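-- pv_equiv track=rewrite | github.com/jeancrodrigues/hackerrank | mine_sweeper_click.py | generate_points
-- ===== SOURCE A (Python) =====
-- def generate_points( pos , num_rows, num_cols ):
--     x,y = pos
--     range_x = range( max( 0,  x - 1 ) , min( num_rows , x + 2 ))
--     range_y = range( max( 0,  y - 1 ) , min( num_cols , y + 2 ))
--     points = list()
--     for a in range_x:
--         for b in range_y:
--             if (a,b) != pos:
--                 points.append((a,b))
--
--     return points
-- ===== SOURCE B (Python) =====
-- def generate_points(pos, num_rows, num_cols):
--     x, y = pos
--     points = []
--     for dx, dy in ((-1, -1), (-1, 0), (-1, 1), (0, -1), (0, 1), (1, -1), (1, 0), (1, 1)):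
--         a, b = x + dx, y + dy
--         if 0 <= a < num_rows and 0 <= b < num_cols:
--             points.append((a, b))
--     return points
-- ===== Notes on version B (the rewrite author's own statement) =====
-- stated objective: idiomatic
-- what changed: Replaces A's clamped-range nested loops with center-exclusion by a single pass over the eight fixed neighbor offsets with a bounds filter (restrict-before vs filter-after).
import Mathlib
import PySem

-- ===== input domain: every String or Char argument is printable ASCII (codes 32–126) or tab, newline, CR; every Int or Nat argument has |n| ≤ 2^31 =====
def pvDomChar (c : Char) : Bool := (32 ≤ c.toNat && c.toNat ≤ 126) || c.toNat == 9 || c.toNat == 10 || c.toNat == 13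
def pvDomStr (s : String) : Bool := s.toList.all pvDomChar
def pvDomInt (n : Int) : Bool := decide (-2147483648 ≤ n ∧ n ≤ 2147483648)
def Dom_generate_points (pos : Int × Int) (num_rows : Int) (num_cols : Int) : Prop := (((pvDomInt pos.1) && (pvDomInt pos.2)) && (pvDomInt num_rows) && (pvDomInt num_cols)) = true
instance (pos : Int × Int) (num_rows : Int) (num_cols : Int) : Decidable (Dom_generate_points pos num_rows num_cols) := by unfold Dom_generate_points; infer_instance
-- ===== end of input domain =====

-- B replaces A's clamped-range nested loops (with center exclusion) by one pass over the
-- eight fixed neighbor offsets with a bounds filter; objective: idiomatic, same cost.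


-- ===== PORT A =====
def generate_points (pos : Int × Int) (num_rows : Int) (num_cols : Int) : List (Int × Int) :=
  let x := pos.1
  let y := pos.2
  let range_x := PySem.List.pyRange (max 0 (x - 1)) (min num_rows (x + 2)) 1
  let range_y := PySem.List.pyRange (max 0 (y - 1)) (min num_cols (y + 2)) 1
  range_x.foldl (fun points a =>
    range_y.foldl (fun points b =>
      if (a, b) ≠ pos then points ++ [(a, b)] else points) points) []

-- ===== PORT B =====
def generate_points_alt (pos : Int × Int) (num_rows : Int) (num_cols : Int) : List (Int × Int) :=
  let x := pos.1
  let y := pos.2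
  [((-1 : Int), (-1 : Int)), (-1, 0), (-1, 1), (0, -1), (0, 1), (1, -1), (1, 0), (1, 1)].foldl
    (fun points d =>
      if 0 ≤ x + d.1 ∧ x + d.1 < num_rows ∧ 0 ≤ y + d.2 ∧ y + d.2 < num_cols then
        points ++ [(x + d.1, y + d.2)]
      else points) []

-- ===== PRECONDITION & SPEC =====
def Spec_generate_points (pos : Int × Int) (num_rows : Int) (num_cols : Int) (out : List (Int × Int)) : Prop := out = generate_points_alt pos num_rows num_cols
instance (pos : Int × Int) (num_rows : Int) (num_cols : Int) (out : List (Int × Int)) : Decidable (Spec_generate_points pos num_rows num_cols out) := by unfold Spec_generate_points; infer_instance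

-- ===== CLAIM (what is proved, stated in full; the proofs are below) =====
def Claim_equal_generate_points : Prop := ∀ (pos : Int × Int) (num_rows : Int) (num_cols : Int), Dom_generate_points pos num_rows num_cols → Spec_generate_points pos num_rows num_cols (generate_points pos num_rows num_cols)

-- ===== LEMMAS AND PROOFS =====

-- strict lexicographic order on points; both programs emit their points in this order
def pvLex (p q : Int × Int) : Prop := p.1 < q.1 ∨ (p.1 = q.1 ∧ p.2 < q.2)

lemma pvLex_antisymm : ∀ p q : Int × Int, pvLex p q → pvLex q p → p = q := by
  rintro ⟨a, b⟩ ⟨c, d⟩ h1 h2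
  simp only [pvLex] at h1 h2
  omega

-- A's result, reshaped from nested foldl-appends into a flatMap of filtered row lists
lemma gp_eq_flatMap (x y num_rows num_cols : Int) :
    generate_points (x, y) num_rows num_cols
      = (PySem.List.pyRange (max 0 (x - 1)) (min num_rows (x + 2)) 1).flatMap (fun a =>
          ((PySem.List.pyRange (max 0 (y - 1)) (min num_cols (y + 2)) 1).filter
            (fun b => decide ((a, b) ≠ (x, y)))).map (fun b => (a, b))) := by
  simp only [generate_points, PySem.List.foldl_append_ite, PySem.List.foldl_append_eq_flatMap,
    List.nil_append]

-- B's result, reshaped into a filtered map over the fixed offset list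
lemma gp_alt_eq_filter (x y num_rows num_cols : Int) :
    generate_points_alt (x, y) num_rows num_cols
      = (([((-1 : Int), (-1 : Int)), (-1, 0), (-1, 1), (0, -1), (0, 1), (1, -1), (1, 0), (1, 1)].filter
          (fun d => decide (0 ≤ x + d.1 ∧ x + d.1 < num_rows ∧ 0 ≤ y + d.2 ∧ y + d.2 < num_cols))).map
          (fun d => (x + d.1, y + d.2))) := by
  simp only [generate_points_alt, PySem.List.foldl_append_ite, List.nil_append]

lemma mem_gp (x y num_rows num_cols u v : Int) :
    (u, v) ∈ generate_points (x, y) num_rows num_cols ↔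
      (max 0 (x - 1) ≤ u ∧ u < min num_rows (x + 2) ∧
       max 0 (y - 1) ≤ v ∧ v < min num_cols (y + 2) ∧ ¬(u = x ∧ v = y)) := by
  rw [gp_eq_flatMap]
  simp only [List.mem_flatMap, List.mem_map, List.mem_filter, PySem.List.mem_pyRange_one,
    decide_eq_true_eq, ne_eq, Prod.mk.injEq]
  constructor
  · rintro ⟨a, ha, b, ⟨hb, hne⟩, h1, h2⟩
    subst h1; subst h2
    exact ⟨ha.1, ha.2, hb.1, hb.2, hne⟩
  · rintro ⟨h1, h2, h3, h4, h5⟩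
    exact ⟨u, ⟨h1, h2⟩, v, ⟨⟨h3, h4⟩, h5⟩, rfl, rfl⟩

lemma mem_gp_alt (x y num_rows num_cols u v : Int) :
    (u, v) ∈ generate_points_alt (x, y) num_rows num_cols ↔
      (max 0 (x - 1) ≤ u ∧ u < min num_rows (x + 2) ∧
       max 0 (y - 1) ≤ v ∧ v < min num_cols (y + 2) ∧ ¬(u = x ∧ v = y)) := by
  rw [gp_alt_eq_filter]
  simp only [List.mem_map, List.mem_filter, List.mem_cons, List.not_mem_nil, or_false,
    decide_eq_true_eq, Prod.mk.injEq, Prod.exists]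
  constructor
  · rintro ⟨dx, dy, ⟨hd, hb⟩, h1, h2⟩
    rcases hd with ⟨e1, e2⟩ | ⟨e1, e2⟩ | ⟨e1, e2⟩ | ⟨e1, e2⟩ | ⟨e1, e2⟩ | ⟨e1, e2⟩ | ⟨e1, e2⟩ | ⟨e1, e2⟩ <;>
      (subst e1; subst e2; omega)
  · rintro ⟨h1, h2, h3, h4, h5⟩
    simp only [max_le_iff, lt_min_iff] at h1 h2 h3 h4
    refine ⟨u - x, v - y, ?_⟩
    omega

lemma sorted_gp (x y num_rows num_cols : Int) :
    (generate_points (x, y) num_rows num_cols).Pairwise pvLex := by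
  rw [gp_eq_flatMap, List.flatMap]
  rw [List.pairwise_flatten]
  refine ⟨?_, ?_⟩
  · intro l hl
    simp only [List.mem_map] at hl
    obtain ⟨a, _, rfl⟩ := hl
    refine List.Pairwise.map _ ?_ (List.Pairwise.filter _ (PySem.List.pairwise_lt_pyRange_one _ _))
    intro b c hbc
    exact Or.inr ⟨rfl, hbc⟩
  · rw [List.pairwise_map]
    refine List.Pairwise.imp ?_ (PySem.List.pairwise_lt_pyRange_one _ _)
    intro a a' haa p hp q hq
    simp only [List.mem_map] at hp hq
    obtain ⟨b, _, rfl⟩ := hp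
    obtain ⟨c, _, rfl⟩ := hq
    exact Or.inl haa

lemma sorted_gp_alt (x y num_rows num_cols : Int) :
    (generate_points_alt (x, y) num_rows num_cols).Pairwise pvLex := by
  rw [gp_alt_eq_filter]
  have hoff : List.Pairwise pvLex
      [((-1 : Int), (-1 : Int)), (-1, 0), (-1, 1), (0, -1), (0, 1), (1, -1), (1, 0), (1, 1)] := by
    simp only [List.pairwise_cons, List.mem_cons, List.not_mem_nil, or_false, pvLex]
    norm_num
  refine List.Pairwise.map (R := pvLex) _ (fun d e h => ?_) (List.Pairwise.filter _ hoff)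
  simp only [pvLex] at h ⊢
  omega

-- ===== VERDICT (by name: the statement is the Claim_ definition above) =====
theorem generate_points_spec : Claim_equal_generate_points := by
  intro pos num_rows num_cols _
  unfold Spec_generate_points
  obtain ⟨x, y⟩ := pos
  have hnd : (generate_points (x, y) num_rows num_cols).Nodup :=
    (sorted_gp x y num_rows num_cols).imp (fun h => by
      rcases h with h | ⟨_, h⟩ <;> (intro he; rw [he] at h; omega))
  have hnd' : (generate_points_alt (x, y) num_rows num_cols).Nodup :=
    (sorted_gp_alt x y num_rows num_cols).imp (fun h => by
      rcases h with h | ⟨_, h⟩ <;> (intro he; rw [he] at h; omega))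
  have hperm : List.Perm (generate_points (x, y) num_rows num_cols) (generate_points_alt (x, y) num_rows num_cols) := by
    rw [List.perm_ext_iff_of_nodup hnd hnd']
    rintro ⟨u, v⟩
    rw [mem_gp, mem_gp_alt]
  exact List.Perm.eq_of_pairwise (fun a b _ _ => pvLex_antisymm a b)
    (sorted_gp x y num_rows num_cols) (sorted_gp_alt x y num_rows num_cols) hperm
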